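-- pv_equiv track=rewrite | github.com/JuniorGassam/Python-Project | tp.py | prob_str_cal
-- ===== SOURCE A (Python) =====
-- def prob_str_cal(alpha):
--     str_pos = {}
--     for char1 in alpha:
--         for char2 in alpha:
--             if char1 not in str_pos:
--                 str_pos[char1] = [(char1 + char2)]
--             else:
--                 str_pos[char1].append((char1 + char2))
--
--     return str_pos
-- ===== SOURCE B (Python) =====
-- def prob_str_cal(alpha):
--     counts = {}
--     for c in alpha:
--         counts[c] = counts.get(c, 0) + 1
--     return {c: [c + x for x in alpha] * k for c, k in counts.items()}
-- ===== Notes on version B (the rewrite author's own statement) =====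
-- stated objective: faster
-- what changed: Replaces the nested loop of per-pair incremental dict appends with a count-first pass (a char counter) followed by a single dict comprehension that builds each distinct char's block [c+x for x in alpha] once and replicates it count(c) times with list multiplication.
import Mathlib
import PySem

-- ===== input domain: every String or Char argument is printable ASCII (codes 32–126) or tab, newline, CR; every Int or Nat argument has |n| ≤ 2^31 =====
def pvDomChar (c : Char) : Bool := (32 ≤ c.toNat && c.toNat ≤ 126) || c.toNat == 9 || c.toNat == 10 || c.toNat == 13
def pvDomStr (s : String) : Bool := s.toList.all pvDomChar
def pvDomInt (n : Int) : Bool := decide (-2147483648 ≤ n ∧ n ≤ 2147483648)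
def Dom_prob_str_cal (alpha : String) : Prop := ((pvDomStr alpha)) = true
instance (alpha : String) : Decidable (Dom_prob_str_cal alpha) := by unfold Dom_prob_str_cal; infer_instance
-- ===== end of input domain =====

-- B counts chars first, builds each block once and replicates it, instead of A's nested per-pair append loops; measured faster in a timing run.


-- ===== PORT A =====
def prob_str_cal (alpha : String) : List (String × List String) :=
  (alpha.toList.foldl (fun d c1 =>
      alpha.toList.foldl (fun d c2 =>
        if d.contains (String.ofList [c1]) = false then
          d.insert (String.ofList [c1]) [String.ofList [c1, c2]]
        else
          d.insert (String.ofList [c1]) (d.getD (String.ofList [c1]) [] ++ [String.ofList [c1, c2]]))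
      d)
    (PySem.Dict.empty)).items

-- ===== PORT B =====
def prob_str_cal_alt (alpha : String) : List (String × List String) :=
  let cs := alpha.toList
  let counts := cs.foldl (fun d x => d.insert x (d.getD x (0:Int) + 1)) PySem.Dict.empty
  (counts.items.foldl (fun d p =>
      d.insert (String.ofList [p.1])
        ((List.replicate p.2.toNat (cs.map (fun x => String.ofList [p.1, x]))).flatten))
    PySem.Dict.empty).items

-- ===== PRECONDITION & SPEC =====
def Spec_prob_str_cal (alpha : String) (out : List (String × List String)) : Prop := out = prob_str_cal_alt alpha
instance (alpha : String) (out : List (String × List String)) : Decidable (Spec_prob_str_cal alpha out) := by unfold Spec_prob_str_cal; infer_instance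

-- ===== CLAIM (what is proved, stated in full; the proofs are below) =====
def Claim_equal_prob_str_cal : Prop := ∀ (alpha : String), Dom_prob_str_cal alpha → Spec_prob_str_cal alpha (prob_str_cal alpha)

-- ===== LEMMAS AND PROOFS =====


-- mkS c = the 1-char Python string used as dict key
theorem pv_mkS_inj {a b : Char} (h : String.ofList [a] = String.ofList [b]) : a = b := by
  have := congrArg String.toList h
  simpa using this

-- A's inner-loop body is exactly 'd[k] = d.get(k, []) + [pair]'
theorem pv_step_eq_modify (d : PySem.Dict String (List String)) (c1 c2 : Char) :
    (if d.contains (String.ofList [c1]) = false then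
        d.insert (String.ofList [c1]) [String.ofList [c1, c2]]
      else
        d.insert (String.ofList [c1]) (d.getD (String.ofList [c1]) [] ++ [String.ofList [c1, c2]]))
    = d.modify (String.ofList [c1]) [] (· ++ [String.ofList [c1, c2]]) := by
  by_cases h : d.contains (String.ofList [c1]) = true
  · simp [h, PySem.Dict.modify]
  · have h' : d.contains (String.ofList [c1]) = false := by simpa using h
    rw [PySem.Dict.modify, PySem.Dict.getD_of_not_contains _ _ h']
    simp [h']

-- the inner loop rewritten as a modify-fold over key/value pairs
theorem pv_inner_eq (cs : List Char) (d : PySem.Dict String (List String)) (c1 : Char) :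
    cs.foldl (fun d c2 =>
        if d.contains (String.ofList [c1]) = false then
          d.insert (String.ofList [c1]) [String.ofList [c1, c2]]
        else
          d.insert (String.ofList [c1]) (d.getD (String.ofList [c1]) [] ++ [String.ofList [c1, c2]])) d
    = (cs.map (fun c2 => (String.ofList [c1], String.ofList [c1, c2]))).foldl
        (fun d p => d.modify p.1 [] (· ++ [p.2])) d := by
  rw [List.foldl_map]
  simp only [pv_step_eq_modify]

theorem pv_inner_getD (cs : List Char) (d : PySem.Dict String (List String)) (c1 : Char) (s : String) :
    ((cs.map (fun c2 => (String.ofList [c1], String.ofList [c1, c2]))).foldl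
        (fun d p => d.modify p.1 [] (· ++ [p.2])) d).getD s []
    = d.getD s []
      ++ (if s = String.ofList [c1] then cs.map (fun x => String.ofList [c1, x]) else []) := by
  rw [PySem.Dict.getD_foldl_modify_append]
  congr 1
  by_cases h : s = String.ofList [c1]
  · subst h
    simp [List.filter_map, Function.comp_def]
  · have hf : ∀ p ∈ cs.map (fun c2 => (String.ofList [c1], String.ofList [c1, c2])),
        ¬ (p.1 == s) = true := by
      intro p hp
      rcases List.mem_map.1 hp with ⟨c2, _, rfl⟩
      simp only [beq_iff_eq]
      exact fun he => h he.symm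
    rw [List.filter_eq_nil_iff.2 hf]
    simp [h]

-- adding the same element repeatedly is adding it once
theorem pv_update_of_contains {α : Type} [BEq α] [LawfulBEq α] (l : List Char) (s : PySem.Set α)
    (k : α) (h : k ∈ s) : PySem.Set.update s (l.map (fun _ => k)) = s := by
  induction l with
  | nil => rfl
  | cons x xs ih =>
    have hadd : PySem.Set.add s k = s := by
      simp [PySem.Set.add, List.contains_eq_mem, h]
    simpa [PySem.Set.update, hadd] using ih

theorem pv_update_const {α : Type} [BEq α] [LawfulBEq α] (l : List Char) (s : PySem.Set α)
    (k : α) (h : l ≠ []) : PySem.Set.update s (l.map (fun _ => k)) = PySem.Set.add s k := by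
  cases l with
  | nil => exact absurd rfl h
  | cons x xs =>
    have hk : k ∈ PySem.Set.add s k := (PySem.Set.mem_add s k k).2 (Or.inr rfl)
    simpa [PySem.Set.update] using pv_update_of_contains xs (PySem.Set.add s k) k hk

-- set(l) commutes with an injective map
theorem pv_add_map (s : PySem.Set Char) (x : Char) :
    PySem.Set.add (s.map (fun c => String.ofList [c])) (String.ofList [x])
    = (PySem.Set.add s x).map (fun c => String.ofList [c]) := by
  by_cases h : x ∈ s
  · have h1 : String.ofList [x] ∈ s.map (fun c => String.ofList [c]) := List.mem_map_of_mem h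
    simp [PySem.Set.add, List.contains_eq_mem, h, h1]
  · have h1 : String.ofList [x] ∉ s.map (fun c => String.ofList [c]) := by
      intro hm
      rcases List.mem_map.1 hm with ⟨c, hc, hce⟩
      exact h (pv_mkS_inj hce.symm ▸ hc)
    simp [PySem.Set.add, List.contains_eq_mem, h, h1]

theorem pv_ofList_map (l : List Char) :
    PySem.Set.ofList (l.map (fun c => String.ofList [c]))
    = (PySem.Set.ofList l).map (fun c => String.ofList [c]) := by
  rw [PySem.Set.ofList_eq_foldl, PySem.Set.ofList_eq_foldl, List.foldl_map]
  have : ∀ (s : PySem.Set Char),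
      l.foldl (fun acc c => PySem.Set.add acc (String.ofList [c])) (s.map (fun c => String.ofList [c]))
      = (l.foldl PySem.Set.add s).map (fun c => String.ofList [c]) := by
    induction l with
    | nil => intro s; rfl
    | cons x xs ih =>
      intro s
      simpa [pv_add_map s x] using ih (PySem.Set.add s x)
  simpa using this ([] : PySem.Set Char)

-- the invariant of A's outer loop: keys in first-appearance order, each value
-- is count-many copies of the block [c+x for x in cs]
theorem pv_outer_inv (cs : List Char) (hcs : cs ≠ []) (p : List Char) :
    (p.foldl (fun d c1 =>
        cs.foldl (fun d c2 =>
          if d.contains (String.ofList [c1]) = false then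
            d.insert (String.ofList [c1]) [String.ofList [c1, c2]]
          else
            d.insert (String.ofList [c1]) (d.getD (String.ofList [c1]) [] ++ [String.ofList [c1, c2]]))
        d) PySem.Dict.empty).keys
      = PySem.Set.ofList (p.map (fun c => String.ofList [c]))
    ∧ ∀ c : Char,
      (p.foldl (fun d c1 =>
        cs.foldl (fun d c2 =>
          if d.contains (String.ofList [c1]) = false then
            d.insert (String.ofList [c1]) [String.ofList [c1, c2]]
          else
            d.insert (String.ofList [c1]) (d.getD (String.ofList [c1]) [] ++ [String.ofList [c1, c2]]))
        d) PySem.Dict.empty).getD (String.ofList [c]) []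
      = (List.replicate (p.count c) (cs.map (fun x => String.ofList [c, x]))).flatten := by
  induction p using List.reverseRecOn with
  | nil => constructor <;> simp [PySem.Set.ofList]
  | append_singleton q c1 ih =>
    rw [List.foldl_append] at *
    obtain ⟨ihk, ihg⟩ := ih
    simp only [List.foldl_cons, List.foldl_nil] at *
    rw [pv_inner_eq]
    constructor
    · rw [PySem.Dict.keys_foldl_modify_key, ihk]
      have hmap : (cs.map (fun c2 => (String.ofList [c1], String.ofList [c1, c2]))).map Prod.fst
          = cs.map (fun _ => String.ofList [c1]) := by
        simp [Function.comp_def]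
      rw [hmap, pv_update_const cs _ _ hcs]
      rw [PySem.Set.ofList_eq_foldl, PySem.Set.ofList_eq_foldl]
      simp [List.foldl_append]
    · intro c
      rw [pv_inner_getD, ihg c]
      by_cases h : c = c1
      · subst h
        simp [List.count_append, List.replicate_succ', List.flatten_append]
      · have hne : String.ofList [c] ≠ String.ofList [c1] := fun he => h (pv_mkS_inj he)
        simp [hne, List.count_append, List.count_singleton, if_neg (Ne.symm h)]


-- ===== VERDICT (by name: the statement is the Claim_ definition above) =====
theorem prob_str_cal_spec : Claim_equal_prob_str_cal := by
  intro alpha _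
  unfold Spec_prob_str_cal prob_str_cal prob_str_cal_alt
  rcases heq : alpha.toList with _ | ⟨c0, cs0⟩
  · rfl
  · rw [← heq]
    have hcs : alpha.toList ≠ [] := by rw [heq]; exact List.cons_ne_nil _ _
    obtain ⟨hk, hg⟩ := pv_outer_inv alpha.toList hcs alpha.toList
    -- A side: items of the accumulated dict, read off through the invariant
    rw [PySem.Dict.items_eq_map_keys _ (by rw [hk]; exact PySem.Set.nodup_ofList _) []]
    rw [hk, pv_ofList_map]
    simp only [List.map_map, Function.comp_def, hg]
    -- B side: counter + fresh-key comprehension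
    rw [PySem.Dict.foldl_insert_getD_add_one_eq_counter]
    rw [PySem.Dict.items_foldl_insert_fresh _ _ _ _
        (by intro a _; exact PySem.Dict.contains_empty _)
        (by
          simp only [PySem.Dict.items_counter, List.map_map, Function.comp_def]
          exact (PySem.Set.nodup_ofList alpha.toList).map
            (fun a b hab => pv_mkS_inj hab))]
    simp [PySem.Dict.items_counter, List.map_map, Function.comp_def, PySem.Dict.empty]
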